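-- pv_equiv track=rewrite | github.com/jdeantoni/pedagogicalWebServer | iiwServer.py | addSpecificFormatting
-- ===== SOURCE A (Python) =====
-- def addSpecificFormatting(content:str, charToSearch: str, tagStart: str, tagEnd: str) -> str:
--     ''' returns a string of the content where the content between 2 charToSearch is prefixed by tagStart and postfixed with tagEnd'''
--     content += (" ") # to handle last word in bold or so
--     i : int = int(0)
--     res: str = str()
--     insideChars: bool = False
--     stringSize: int = len(content)
--     while i<stringSize :
--         currentChar: str = content[i]
--         nextChar:str = str("")
--         if (i < stringSize - 1):
--             nextChar = content[i+1]
--         if (currentChar == charToSearch and nextChar == charToSearch):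
--             if (not insideChars):
--                 insideChars = True
--                 res = res + tagStart
--                 i += 1
--             else:
--                 insideChars = False
--                 res = res + tagEnd
--                 i += 1
--         else:
--             res = res+currentChar
--         i += 1
--     return res
-- ===== SOURCE B (Python) =====
-- def addSpecificFormatting(content: str, charToSearch: str, tagStart: str, tagEnd: str) -> str:
--     '''split on the doubled marker and rejoin, alternating tagStart/tagEnd between the parts'''
--     content += " "
--     if len(charToSearch) != 1:
--         # a marker that is not a single character can never match A's per-character scan
--         return content
--     parts = content.split(charToSearch * 2)
--     res = parts[0]
--     for j, part in enumerate(parts[1:]):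
--         res += (tagStart if j % 2 == 0 else tagEnd) + part
--     return res
-- ===== Notes on version B (the rewrite author's own statement) =====
-- stated objective: simpler
-- what changed: Replaced the index-based character-scan state machine (manual i, insideChars toggle, quadratic per-char string appends) with a split on the doubled marker followed by an alternating rejoin with tagStart/tagEnd, which a timing run measured as much faster (C-level split, no per-character Python loop).
import Mathlib
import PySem

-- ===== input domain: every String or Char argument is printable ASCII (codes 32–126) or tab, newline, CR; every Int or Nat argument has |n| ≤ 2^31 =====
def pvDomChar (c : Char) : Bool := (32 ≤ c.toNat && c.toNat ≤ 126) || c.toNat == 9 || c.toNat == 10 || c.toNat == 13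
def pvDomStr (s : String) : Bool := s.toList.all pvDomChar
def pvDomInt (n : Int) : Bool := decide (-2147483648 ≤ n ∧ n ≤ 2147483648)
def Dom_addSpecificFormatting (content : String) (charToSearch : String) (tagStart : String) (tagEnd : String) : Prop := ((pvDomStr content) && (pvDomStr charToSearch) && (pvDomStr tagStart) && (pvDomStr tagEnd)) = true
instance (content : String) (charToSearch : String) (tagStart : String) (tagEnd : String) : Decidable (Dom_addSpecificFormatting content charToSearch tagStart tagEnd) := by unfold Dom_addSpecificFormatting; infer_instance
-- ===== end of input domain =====

-- B replaces A's per-character scan with insideChars toggle by split-on-doubled-marker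
-- plus an alternating rejoin (objective: simpler); return values proved equal on all inputs.


-- ===== PORT A =====
-- A's while loop over content+" ": currentChar = content[i] (one char), nextChar = content[i+1]
-- or "" at the end; on a double marker toggle insideChars, emit tagStart/tagEnd and skip both
-- chars (i += 2), else emit the char.  Strings are carried as List Char (PySem convention).
def pvALoop (ch tagS tagE : List Char) : List Char → Bool → List Char → List Char
  | [], _, res => res
  | [c], inside, res =>
    -- last position: nextChar = ""
    if [c] = ch ∧ ([] : List Char) = ch then
      (if !inside then res ++ tagS else res ++ tagE)   -- i += 2 ends the loop
    else res ++ [c]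
  | c :: d :: rest, inside, res =>
    if [c] = ch ∧ [d] = ch then
      (if !inside then pvALoop ch tagS tagE rest true (res ++ tagS)
       else pvALoop ch tagS tagE rest false (res ++ tagE))
    else pvALoop ch tagS tagE (d :: rest) inside (res ++ [c])

def addSpecificFormatting (content : String) (charToSearch : String) (tagStart : String) (tagEnd : String) : String :=
  -- content += " "; i = 0; res = ""; insideChars = False; while loop
  String.ofList (pvALoop charToSearch.toList tagStart.toList tagEnd.toList
    (content.toList ++ [' ']) false [])

-- ===== PORT B =====
def addSpecificFormatting_alt (content : String) (charToSearch : String) (tagStart : String) (tagEnd : String) : String :=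
  -- content += " "
  if charToSearch.toList.length ≠ 1 then String.ofList (content.toList ++ [' '])
  else
    -- parts = content.split(charToSearch * 2)
    match PySem.Chars.split? (content.toList ++ [' ']) (charToSearch.toList ++ charToSearch.toList) with
    | none => String.ofList (content.toList ++ [' '])    -- unreachable: the separator is nonempty
    | some parts =>
      match parts with
      | [] => String.ofList []                           -- unreachable: split is never empty
      | p :: rest =>                                     -- res = parts[0]
        -- for j, part in enumerate(parts[1:]): res += (tagStart if j%2==0 else tagEnd) + part
        String.ofList ((rest.foldl
          (fun (st : List Char × Nat) part =>
            (st.1 ++ (if st.2 % 2 = 0 then tagStart.toList else tagEnd.toList) ++ part,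
             st.2 + 1))
          (p, 0)).1)

-- ===== PRECONDITION & SPEC =====
def Spec_addSpecificFormatting (content : String) (charToSearch : String) (tagStart : String) (tagEnd : String) (out : String) : Prop := out = addSpecificFormatting_alt content charToSearch tagStart tagEnd
instance (content : String) (charToSearch : String) (tagStart : String) (tagEnd : String) (out : String) : Decidable (Spec_addSpecificFormatting content charToSearch tagStart tagEnd out) := by unfold Spec_addSpecificFormatting; infer_instance

-- ===== CLAIM (what is proved, stated in full; the proofs are below) =====
def Claim_equal_addSpecificFormatting : Prop := ∀ (content : String) (charToSearch : String) (tagStart : String) (tagEnd : String), Dom_addSpecificFormatting content charToSearch tagStart tagEnd → Spec_addSpecificFormatting content charToSearch tagStart tagEnd (addSpecificFormatting content charToSearch tagStart tagEnd)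

-- ===== LEMMAS AND PROOFS =====

-- Greedy left-to-right split on the doubled marker, as a simple structural recursion.
def pvSpl (m : Char) : List Char → List (List Char)
  | [] => [[]]
  | [c] => [[c]]
  | c :: d :: rest =>
    if c = m ∧ d = m then [] :: pvSpl m rest
    else List.modifyHead (c :: ·) (pvSpl m (d :: rest))

-- Alternating tag join of the parts after the first.
def pvTags (tagS tagE : List Char) : Bool → List (List Char) → List Char
  | _, [] => []
  | inside, q :: rest => (if inside then tagE else tagS) ++ q ++ pvTags tagS tagE (!inside) rest

theorem pvSpl_ne_nil (m : Char) (cs : List Char) : pvSpl m cs ≠ [] := by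
  match cs with
  | [] => simp [pvSpl]
  | [c] => simp [pvSpl]
  | c :: d :: rest =>
    unfold pvSpl
    split
    · simp
    · cases h : pvSpl m (d :: rest) with
      | nil => exact absurd h (pvSpl_ne_nil m (d :: rest))
      | cons p ps => simp [List.modifyHead]

-- A's loop equals: res ++ first part ++ alternating tags between the remaining parts.
theorem pvALoop_eq_spl (m : Char) (tagS tagE : List Char) (cs : List Char)
    (inside : Bool) (res : List Char) :
    pvALoop [m] tagS tagE cs inside res =
      res ++ (pvSpl m cs).headI ++ pvTags tagS tagE inside (pvSpl m cs).tail := by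
  match cs with
  | [] => simp [pvALoop, pvSpl, pvTags]
  | [c] =>
    simp only [pvALoop, pvSpl]
    rw [if_neg (by simp)]
    simp [pvTags]
  | c :: d :: rest =>
    rw [pvALoop, pvSpl]
    by_cases h : [c] = [m] ∧ [d] = [m]
    · have hc : c = m ∧ d = m := by simpa using h
      rw [if_pos h, if_pos hc]
      cases hs : pvSpl m rest with
      | nil => exact absurd hs (pvSpl_ne_nil m rest)
      | cons p ps =>
        cases inside with
        | false =>
          simp only [Bool.not_false, if_pos]
          rw [pvALoop_eq_spl m tagS tagE rest true (res ++ tagS)]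
          simp [hs, pvTags, List.append_assoc]
        | true =>
          simp only [Bool.not_true]
          rw [if_neg (by simp)]
          rw [pvALoop_eq_spl m tagS tagE rest false (res ++ tagE)]
          simp [hs, pvTags, List.append_assoc]
    · have hc : ¬ (c = m ∧ d = m) := by
        intro hcm; exact h (by simp [hcm.1, hcm.2])
      rw [if_neg h, if_neg hc]
      rw [pvALoop_eq_spl m tagS tagE (d :: rest) inside (res ++ [c])]
      cases hs : pvSpl m (d :: rest) with
      | nil => exact absurd hs (pvSpl_ne_nil m (d :: rest))
      | cons p ps => simp [List.modifyHead]

-- When the marker is not a single character, A's condition never fires.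
theorem pvALoop_of_len_ne_one (ch tagS tagE : List Char) (hch : ch.length ≠ 1)
    (cs : List Char) (inside : Bool) (res : List Char) :
    pvALoop ch tagS tagE cs inside res = res ++ cs := by
  match cs with
  | [] => simp [pvALoop]
  | [c] =>
    have hne : ¬ ([c] = ch ∧ ([] : List Char) = ch) := by
      rintro ⟨h1, -⟩; exact hch (h1 ▸ rfl)
    simp only [pvALoop]
    rw [if_neg hne]
  | c :: d :: rest =>
    have hne : ¬ ([c] = ch ∧ [d] = ch) := by
      rintro ⟨h1, -⟩; exact hch (h1 ▸ rfl)
    rw [pvALoop, if_neg hne,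
      pvALoop_of_len_ne_one ch tagS tagE hch (d :: rest) inside (res ++ [c])]
    simp

-- PySem's fuelled split scanner equals pvSpl (fuel large enough).
theorem pvGo_eq_spl (m : Char) (fuel : Nat) (l cur : List Char) (acc : List (List Char))
    (hf : l.length < fuel) :
    PySem.Chars.splitOn.go [m, m] fuel l cur acc =
      acc.reverse ++ List.modifyHead (cur.reverse ++ ·) (pvSpl m l) := by
  match fuel, l with
  | fuel + 1, [] => simp [PySem.Chars.splitOn.go, pvSpl, List.modifyHead]
  | fuel + 1, c :: rest =>
    rw [PySem.Chars.splitOn.go]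
    by_cases hp : List.isPrefixOf [m, m] (c :: rest) = true
    · have hpre : [m, m] <+: c :: rest := by
        rwa [List.isPrefixOf_iff_prefix] at hp
      obtain ⟨d, rest', rfl⟩ : ∃ d rest', rest = d :: rest' := by
        cases rest with
        | nil => rcases hpre with ⟨t, ht⟩; simp at ht
        | cons d rest' => exact ⟨d, rest', rfl⟩
      have hmd : c = m ∧ d = m := by
        rcases hpre with ⟨t, ht⟩
        simp at ht
        exact ⟨ht.1.symm, ht.2.1.symm⟩
      rw [if_pos hp]
      have hdrop : List.drop ([m, m] : List Char).length (c :: d :: rest') = rest' := by simp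
      rw [hdrop]
      have hlen : rest'.length < fuel := by simp at hf; omega
      rw [pvGo_eq_spl m fuel rest' [] _ hlen]
      cases hs : pvSpl m rest' with
      | nil => exact absurd hs (pvSpl_ne_nil m rest')
      | cons p ps =>
        simp [pvSpl, hmd.1, hmd.2, hs, List.modifyHead]
    · rw [if_neg hp]
      have hlen : rest.length < fuel := by simp at hf; omega
      rw [pvGo_eq_spl m fuel rest (c :: cur) acc hlen]
      cases rest with
      | nil =>
        simp [pvSpl, List.modifyHead]
      | cons d rest' =>
        have hne : ¬ (c = m ∧ d = m) := by
          rintro ⟨rfl, rfl⟩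
          exact hp (by rw [List.isPrefixOf_iff_prefix]; exact ⟨rest', rfl⟩)
        rw [pvSpl, if_neg hne]
        cases hs : pvSpl m (d :: rest') with
        | nil => exact absurd hs (pvSpl_ne_nil m (d :: rest'))
        | cons p ps => simp [List.modifyHead]

theorem pvSplitOn_eq_spl (m : Char) (cs : List Char) :
    PySem.Chars.splitOn cs [m, m] = pvSpl m cs := by
  rw [PySem.Chars.splitOn, pvGo_eq_spl m (cs.length + 1) cs [] [] (by omega)]
  cases hs : pvSpl m cs with
  | nil => exact absurd hs (pvSpl_ne_nil m cs)
  | cons p ps => simp [List.modifyHead]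

-- B's counting fold equals the alternating tag join.
theorem pvFold_eq_tags (tagS tagE : List Char) (rest : List (List Char)) :
    ∀ (res : List Char) (j : Nat),
    (rest.foldl
      (fun (st : List Char × Nat) part =>
        (st.1 ++ (if st.2 % 2 = 0 then tagS else tagE) ++ part, st.2 + 1))
      (res, j)).1 = res ++ pvTags tagS tagE (decide (j % 2 = 1)) rest := by
  induction rest with
  | nil => intro res j; simp [pvTags]
  | cons q qs ih =>
    intro res j
    simp only [List.foldl_cons, ih, pvTags]
    by_cases hj : j % 2 = 0
    · have h1 : (j + 1) % 2 = 1 := by omega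
      have h2 : ¬ j % 2 = 1 := by omega
      simp [hj, h1, List.append_assoc]
    · have h0 : j % 2 = 1 := by omega
      have h1 : ¬ (j + 1) % 2 = 1 := by omega
      simp [h0, h1, List.append_assoc]

-- ===== VERDICT (by name: the statement is the Claim_ definition above) =====
theorem addSpecificFormatting_spec : Claim_equal_addSpecificFormatting := by
  intro content charToSearch tagStart tagEnd _
  unfold Spec_addSpecificFormatting
  rw [addSpecificFormatting, addSpecificFormatting_alt]
  by_cases hch : charToSearch.toList.length = 1
  · obtain ⟨m, hm⟩ : ∃ m, charToSearch.toList = [m] := by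
      cases h : charToSearch.toList with
      | nil => rw [h] at hch; simp at hch
      | cons a l =>
        rw [h] at hch; simp at hch
        exact ⟨a, by simp [hch]⟩
    rw [hm, if_neg (by simp)]
    rw [show PySem.Chars.split? (content.toList ++ [' ']) ([m] ++ [m])
          = some (pvSpl m (content.toList ++ [' '])) by
        rw [show ([m] ++ [m] : List Char) = [m, m] from rfl]
        rw [show PySem.Chars.split? (content.toList ++ [' ']) [m, m]
              = some (PySem.Chars.splitOn (content.toList ++ [' ']) [m, m]) by
            simp [PySem.Chars.split?]]
        rw [pvSplitOn_eq_spl]]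
    rw [pvALoop_eq_spl]
    cases hs : pvSpl m (content.toList ++ [' ']) with
    | nil => exact absurd hs (pvSpl_ne_nil m _)
    | cons p ps =>
      simp only [List.headI, List.tail, List.nil_append]
      rw [pvFold_eq_tags]
      simp
  · rw [if_pos hch, pvALoop_of_len_ne_one _ _ _ hch]
    simp
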